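-- pv_equiv track=rewrite | github.com/Mikepelgar/DS340W-Final-Code | evaluate_all.py | find_all_wave_transitions
-- ===== SOURCE A (Python) =====
-- SUSTAINED_DAYS = 3      # consecutive days above threshold to confirm alert
--
-- def find_all_wave_transitions(labels, min_days=SUSTAINED_DAYS):
--     """
--     Returns list of (wave_start_idx, preceding_quiet_start_idx) for
--     every sustained L2 run that is preceded by a non-L2 period.
--     """
--     transitions = []
--     n = len(labels)
--     i = 0
--     while i < n:
--         # Skip to next non-L2 position
--         if labels[i] == 2:
--             i += 1
--             continue
--         quiet_start = i
--         # Walk through the non-L2 gap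
--         while i < n and labels[i] != 2:
--             i += 1
--         if i == n:
--             break
--         # Now at a potential L2 run start
--         run_start = i
--         while i < n and labels[i] == 2:
--             i += 1
--         run_len = i - run_start
--         if run_len >= min_days:
--             transitions.append((run_start, quiet_start))
--     return transitions
-- ===== SOURCE B (Python) =====
-- SUSTAINED_DAYS = 3      # consecutive days above threshold to confirm alert
--
-- def find_all_wave_transitions(labels, min_days=SUSTAINED_DAYS):
--     # Pass 1: build maximal runs as (start_index, is_l2, length), grouping by labels[i] == 2.
--     runs = []
--     i, n = 0, len(labels)
--     while i < n:
--         k = labels[i] == 2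
--         j = i + 1
--         while j < n and (labels[j] == 2) == k:
--             j += 1
--         runs.append((i, k, j - i))
--         i = j
--     # Pass 2: a quiet run immediately followed by a long-enough L2 run yields a transition.
--     out = []
--     for (qs, qk, _), (rs, rk, rlen) in zip(runs, runs[1:]):
--         if not qk and rk and rlen >= min_days:
--             out.append((rs, qs))
--     return out
-- ===== Notes on version B (the rewrite author's own statement) =====
-- stated objective: alternative
-- what changed: Replaces the fused interleaved while-loop scan by a two-phase decomposition: first build an explicit table of maximal runs (start, is_l2, length), then scan consecutive run pairs emitting (l2_start, quiet_start) when a quiet run is followed by an L2 run of length >= min_days.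
import Mathlib
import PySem

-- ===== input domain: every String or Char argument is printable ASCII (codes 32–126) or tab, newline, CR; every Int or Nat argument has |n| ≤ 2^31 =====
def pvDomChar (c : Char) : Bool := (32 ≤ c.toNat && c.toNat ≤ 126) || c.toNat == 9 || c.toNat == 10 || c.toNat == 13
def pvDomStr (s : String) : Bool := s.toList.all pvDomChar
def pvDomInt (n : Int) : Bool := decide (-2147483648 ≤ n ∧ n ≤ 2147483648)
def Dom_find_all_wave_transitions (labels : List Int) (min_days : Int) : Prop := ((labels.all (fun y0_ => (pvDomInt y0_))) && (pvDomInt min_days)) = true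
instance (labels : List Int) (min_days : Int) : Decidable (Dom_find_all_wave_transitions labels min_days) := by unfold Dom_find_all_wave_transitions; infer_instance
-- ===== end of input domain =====

-- B re-implements A as a two-phase decomposition (build a table of maximal runs, then scan
-- consecutive run pairs) instead of A's fused interleaved while-loop scan; same O(n) cost.

-- ===== PORT A =====
-- inner while: `while i < n and labels[i] != 2: i += 1` on the suffix, carrying the absolute index
def pvSkipNon2 : List Int → Int → (List Int × Int)
  | [], i => ([], i)
  | x :: xs, i => if x ≠ 2 then pvSkipNon2 xs (i + 1) else (x :: xs, i)

-- inner while: `while i < n and labels[i] == 2: i += 1`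
def pvSkip2 : List Int → Int → (List Int × Int)
  | [], i => ([], i)
  | x :: xs, i => if x = 2 then pvSkip2 xs (i + 1) else (x :: xs, i)

theorem pvSkipNon2_len : ∀ (l : List Int) (i : Int), (pvSkipNon2 l i).1.length ≤ l.length := by
  intro l
  induction l with
  | nil => intro i; simp [pvSkipNon2]
  | cons x xs ih =>
    intro i
    by_cases h : x = 2 <;> simp [pvSkipNon2, h]
    exact Nat.le_succ_of_le (ih (i + 1))

theorem pvSkip2_len : ∀ (l : List Int) (i : Int), (pvSkip2 l i).1.length ≤ l.length := by
  intro l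
  induction l with
  | nil => intro i; simp [pvSkip2]
  | cons x xs ih =>
    intro i
    by_cases h : x = 2 <;> simp [pvSkip2, h]
    exact Nat.le_succ_of_le (ih (i + 1))

-- outer while loop of A, on the remaining suffix with absolute index i
def pvLoopA (min_days : Int) : List Int → Int → List (Int × Int)
  | [], _ => []
  | x :: xs, i =>
    if x = 2 then pvLoopA min_days xs (i + 1)
    else
      -- quiet_start = i; walk through the non-L2 gap
      if (pvSkipNon2 (x :: xs) i).1 = [] then []
      else
        (if (pvSkip2 (pvSkipNon2 (x :: xs) i).1 (pvSkipNon2 (x :: xs) i).2).2 -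
              (pvSkipNon2 (x :: xs) i).2 ≥ min_days
          then [((pvSkipNon2 (x :: xs) i).2, i)] else []) ++
          pvLoopA min_days (pvSkip2 (pvSkipNon2 (x :: xs) i).1 (pvSkipNon2 (x :: xs) i).2).1
            (pvSkip2 (pvSkipNon2 (x :: xs) i).1 (pvSkipNon2 (x :: xs) i).2).2
  termination_by l _ => l.length
  decreasing_by
  · simp
  · show (pvSkip2 (pvSkipNon2 (x :: xs) i).1 (pvSkipNon2 (x :: xs) i).2).1.length < (x :: xs).length
    have h1 : (pvSkipNon2 (x :: xs) i).1.length ≤ xs.length := by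
      simp only [pvSkipNon2, if_pos (by assumption : x ≠ 2)]
      exact pvSkipNon2_len xs (i + 1)
    have h2 := pvSkip2_len (pvSkipNon2 (x :: xs) i).1 (pvSkipNon2 (x :: xs) i).2
    simp only [List.length_cons]
    omega

def find_all_wave_transitions (labels : List Int) (min_days : Int) : List (Int × Int) :=
  pvLoopA min_days labels 0

-- ===== PORT B =====
-- inner while of pass 1: count of the leading elements of the same kind k, plus the rest
def pvTakeRun (k : Bool) : List Int → (Int × List Int)
  | [] => (0, [])
  | x :: xs => if (x == 2) = k then ((pvTakeRun k xs).1 + 1, (pvTakeRun k xs).2) else (0, x :: xs)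

theorem pvTakeRun_len : ∀ (k : Bool) (l : List Int), (pvTakeRun k l).2.length ≤ l.length := by
  intro k l
  induction l with
  | nil => simp [pvTakeRun]
  | cons x xs ih =>
    by_cases h : (x == 2) = k <;> simp [pvTakeRun, h]
    exact Nat.le_succ_of_le ih

-- pass 1: build the table of maximal runs (start, is_l2, length)
def pvBuildRuns : List Int → Int → List (Int × Bool × Int)
  | [], _ => []
  | x :: xs, i =>
    (i, x == 2, (pvTakeRun (x == 2) xs).1 + 1) ::
      pvBuildRuns (pvTakeRun (x == 2) xs).2 (i + (pvTakeRun (x == 2) xs).1 + 1)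
  termination_by l _ => l.length
  decreasing_by
    simp only [List.length_cons]
    exact Nat.lt_succ_of_le (pvTakeRun_len _ xs)

-- pass 2: scan consecutive run pairs (zip(runs, runs[1:]))
def pvScanPairs (min_days : Int) : List (Int × Bool × Int) → List (Int × Int)
  | r1 :: r2 :: rest =>
      (if ¬ r1.2.1 ∧ r2.2.1 ∧ r2.2.2 ≥ min_days then [(r2.1, r1.1)] else []) ++
        pvScanPairs min_days (r2 :: rest)
  | _ => []

def find_all_wave_transitions_alt (labels : List Int) (min_days : Int) : List (Int × Int) :=
  pvScanPairs min_days (pvBuildRuns labels 0)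

-- ===== PRECONDITION & SPEC =====
def Spec_find_all_wave_transitions (labels : List Int) (min_days : Int) (out : List (Int × Int)) : Prop := out = find_all_wave_transitions_alt labels min_days
instance (labels : List Int) (min_days : Int) (out : List (Int × Int)) : Decidable (Spec_find_all_wave_transitions labels min_days out) := by unfold Spec_find_all_wave_transitions; infer_instance

-- ===== CLAIM (what is proved, stated in full; the proofs are below) =====
def Claim_equal_find_all_wave_transitions : Prop := ∀ (labels : List Int) (min_days : Int), Dom_find_all_wave_transitions labels min_days → Spec_find_all_wave_transitions labels min_days (find_all_wave_transitions labels min_days)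

-- ===== LEMMAS AND PROOFS =====

-- A's skip loops compute the same split as B's pvTakeRun, index shifted by the count
theorem skipNon2_eq_takeRun : ∀ (l : List Int) (i : Int),
    pvSkipNon2 l i = ((pvTakeRun false l).2, i + (pvTakeRun false l).1) := by
  intro l
  induction l with
  | nil => intro i; simp [pvSkipNon2, pvTakeRun]
  | cons x xs ih =>
    intro i
    by_cases h : x = 2
    · simp [pvSkipNon2, pvTakeRun, h]
    · have hx : (x == 2) = false := by simp [h]
      simp [pvSkipNon2, pvTakeRun, h, hx, ih (i + 1), Prod.ext_iff]
      omega

theorem skip2_eq_takeRun : ∀ (l : List Int) (i : Int),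
    pvSkip2 l i = ((pvTakeRun true l).2, i + (pvTakeRun true l).1) := by
  intro l
  induction l with
  | nil => intro i; simp [pvSkip2, pvTakeRun]
  | cons x xs ih =>
    intro i
    by_cases h : x = 2
    · have hx : (x == 2) = true := by simp [h]
      simp [pvSkip2, pvTakeRun, h, ih (i + 1), Prod.ext_iff]
      omega
    · simp [pvSkip2, pvTakeRun, h]

-- the head of pvTakeRun's remainder has the opposite kind
theorem takeRun_rest_head : ∀ (k : Bool) (l : List Int) (y : Int) (ys : List Int),
    (pvTakeRun k l).2 = y :: ys → (y == 2) ≠ k := by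
  intro k l
  induction l with
  | nil => intro y ys h; simp [pvTakeRun] at h
  | cons x xs ih =>
    intro y ys h
    by_cases hk : (x == 2) = k
    · simp only [pvTakeRun, if_pos hk] at h
      exact ih y ys h
    · simp only [pvTakeRun, if_neg hk] at h
      rw [List.cons.injEq] at h
      rw [← h.1]
      exact hk

-- an L2 run heading the table never emits (pair condition needs a quiet first run)
theorem scanPairs_true_cons (min_days s c : Int) (R : List (Int × Bool × Int)) :
    pvScanPairs min_days ((s, true, c) :: R) = pvScanPairs min_days R := by
  cases R with
  | nil => simp [pvScanPairs]
  | cons r2 rest => simp [pvScanPairs]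

theorem loopA_eq_scanRuns : ∀ (n : Nat) (l : List Int) (i min_days : Int), l.length ≤ n →
    pvLoopA min_days l i = pvScanPairs min_days (pvBuildRuns l i) := by
  intro n
  induction n with
  | zero =>
    intro l i md hl
    rw [List.length_eq_zero_iff.mp (Nat.le_zero.mp hl)]
    simp [pvLoopA, pvBuildRuns, pvScanPairs]
  | succ n ih =>
    intro l i md hl
    cases l with
    | nil => simp [pvLoopA, pvBuildRuns, pvScanPairs]
    | cons x xs =>
      simp only [List.length_cons, Nat.succ_le_succ_iff] at hl
      by_cases h : x = 2
      · -- leading L2 run: A skips it one step at a time, B's table starts with a true run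
        have hx2 : (x == 2) = true := by simp [h]
        rw [pvLoopA, if_pos h]
        rw [pvBuildRuns, hx2, scanPairs_true_cons]
        -- A keeps skipping 2s: pvLoopA xs (i+1) = pvLoopA over the rest after the 2-run
        have hskip : ∀ (m : Nat) (l' : List Int) (j : Int), l'.length ≤ m →
            pvLoopA md l' j = pvLoopA md (pvSkip2 l' j).1 (pvSkip2 l' j).2 := by
          intro m
          induction m with
          | zero =>
            intro l' j hl'
            rw [List.length_eq_zero_iff.mp (Nat.le_zero.mp hl')]
            simp [pvSkip2]
          | succ m ihm =>
            intro l' j hl'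
            cases l' with
            | nil => simp [pvSkip2]
            | cons y ys =>
              simp only [List.length_cons, Nat.succ_le_succ_iff] at hl'
              by_cases hy : y = 2
              · rw [pvLoopA, if_pos hy, pvSkip2, if_pos hy]
                exact ihm ys (j + 1) hl'
              · simp [pvSkip2, hy]
        rw [hskip xs.length xs (i + 1) le_rfl, skip2_eq_takeRun]
        have := pvTakeRun_len true xs
        rw [ih (pvTakeRun true xs).2 (i + 1 + (pvTakeRun true xs).1) md (by omega)]
        have harith : i + 1 + (pvTakeRun true xs).1 = i + (pvTakeRun true xs).1 + 1 := by omega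
        rw [harith]
      · -- head is quiet: A walks the quiet gap then the L2 run; B's table starts with a false run
        have hx2 : (x == 2) = false := by simp [h]
        rw [pvLoopA, if_neg h]
        have hq := skipNon2_eq_takeRun (x :: xs) i
        have hq' : pvSkipNon2 (x :: xs) i = ((pvTakeRun false xs).2, i + (pvTakeRun false xs).1 + 1) := by
          rw [pvSkipNon2, if_pos h, skipNon2_eq_takeRun, Prod.ext_iff]
          refine ⟨rfl, by simp; omega⟩
        rw [pvBuildRuns, hx2]
        cases hrest : (pvTakeRun false xs).2 with
        | nil =>
          -- quiet gap runs to the end: A breaks, B's table is a single run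
          rw [if_pos (show (pvSkipNon2 (x :: xs) i).1 = [] by rw [hq', hrest])]
          simp [pvBuildRuns, pvScanPairs]
        | cons y ys =>
          rw [if_neg (show ¬(pvSkipNon2 (x :: xs) i).1 = [] by rw [hq', hrest]; simp)]
          have hy2 : (y == 2) = true := by
            have := takeRun_rest_head false xs y ys hrest
            simpa using this
          have hy : y = 2 := by simpa using hy2
          -- A's skip2 over the L2 run
          have hs2 : pvSkip2 (pvSkipNon2 (x :: xs) i).1 (pvSkipNon2 (x :: xs) i).2 =
              ((pvTakeRun true ys).2,
                i + (pvTakeRun false xs).1 + 1 + ((pvTakeRun true ys).1 + 1)) := by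
            rw [hq', hrest]
            show pvSkip2 (y :: ys) (i + (pvTakeRun false xs).1 + 1) = _
            rw [pvSkip2, if_pos hy, skip2_eq_takeRun, Prod.ext_iff]
            refine ⟨rfl, by simp; omega⟩
          rw [hs2, hq']
          -- B's table: false run, true run, rest
          rw [hrest, pvBuildRuns, hy2, pvScanPairs]
          have hlen1 := pvTakeRun_len false xs
          have hlen2 := pvTakeRun_len true ys
          have hlenys : ys.length < xs.length := by
            have : (y :: ys).length ≤ xs.length := hrest ▸ hlen1
            simpa using this
          rw [scanPairs_true_cons,
            ← ih (pvTakeRun true ys).2 (i + (pvTakeRun false xs).1 + 1 + (pvTakeRun true ys).1 + 1) md (by omega)]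
          have hcond : (i + (pvTakeRun false xs).1 + 1 + ((pvTakeRun true ys).1 + 1) -
              (i + (pvTakeRun false xs).1 + 1) ≥ md) ↔ ((pvTakeRun true ys).1 + 1 ≥ md) := by
            omega
          have harith : i + (pvTakeRun false xs).1 + 1 + ((pvTakeRun true ys).1 + 1) =
              i + (pvTakeRun false xs).1 + 1 + (pvTakeRun true ys).1 + 1 := by omega
          rw [harith]
          by_cases hc : (pvTakeRun true ys).1 + 1 ≥ md
          · rw [if_pos (by omega), if_pos (by simpa using hc)]
          · rw [if_neg (by omega), if_neg (by simp; omega)]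

-- ===== VERDICT (by name: the statement is the Claim_ definition above) =====
theorem find_all_wave_transitions_spec : Claim_equal_find_all_wave_transitions := by
  intro labels min_days _
  show find_all_wave_transitions labels min_days = find_all_wave_transitions_alt labels min_days
  exact loopA_eq_scanRuns labels.length labels 0 min_days le_rfl
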